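-- pv_equiv track=rewrite | github.com/oernster/trainer | src/ui/widgets/train_item_widget.py | _is_likely_same_train_service
-- ===== SOURCE A (Python) =====
-- def _is_likely_same_train_service(current_line: str, next_line: str, operator: str) -> bool:
--     """
--     Check if two different line names likely represent the same physical train service.
--
--     Args:
--         current_line: Current line name
--         next_line: Next line name
--         operator: Train operator
--
--     Returns:
--         True if likely the same physical train service
--     """
--     # Great Western Railway services often have different line names but same train
--     if operator in ["Great Western Railway", "GWR"]:
--         gwr_lines = [
--             "Great Western Main Line", "Great Western Railway", "Reading to Basingstoke Line",
--             "Cotswold Line", "Thames Valley Line", "Relief Line"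
--         ]
--
--         if current_line in gwr_lines and next_line in gwr_lines:
--             return True
--         else:
--             # Check for partial matches or variations
--             current_lower = current_line.lower()
--             next_lower = next_line.lower()
--
--             gwr_keywords = ["great western", "gwr", "reading", "cotswold", "thames valley"]
--             current_has_gwr = any(keyword in current_lower for keyword in gwr_keywords)
--             next_has_gwr = any(keyword in next_lower for keyword in gwr_keywords)
--
--             if current_has_gwr and next_has_gwr:
--                 return True
--
--     # Cross Country services
--     if operator in ["Cross Country", "CrossCountry"]:
--         cross_country_lines = [
--             "Cross Country Line", "CrossCountry", "West Coast Main Line",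
--             "East Coast Main Line", "Midland Main Line"
--         ]
--         if current_line in cross_country_lines and next_line in cross_country_lines:
--             return True
--
--     # South Western Railway services
--     if operator in ["South Western Railway", "SWR"]:
--         swr_lines = [
--             "South Western Main Line", "Portsmouth Direct Line", "Reading to Basingstoke Line"
--         ]
--         if current_line in swr_lines and next_line in swr_lines:
--             return True
--
--     # Virgin Trains / Avanti West Coast
--     if operator in ["Virgin Trains", "Avanti West Coast"]:
--         west_coast_lines = [
--             "West Coast Main Line", "Virgin Trains", "Avanti West Coast"
--         ]
--         if current_line in west_coast_lines and next_line in west_coast_lines: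
--             return True
--
--     return False
-- ===== SOURCE B (Python) =====
-- _GWR_KEYWORDS = ["great western", "gwr", "reading", "cotswold", "thames valley"]
--
--
-- def _in_group(lines):
--     def pred(line):
--         return line in lines
--     return pred
--
--
-- def _has_gwr_keyword(line):
--     low = line.lower()
--     return any(kw in low for kw in _GWR_KEYWORDS)
--
--
-- # Declarative rules table: each rule is (operator aliases, line predicate).
-- # A pair of lines is the same service iff some rule's operator matches and
-- # BOTH lines satisfy that rule's predicate.  The GWR keyword fallback is just
-- # another rule, not a special code path.
-- _RULES = [
--     (("Great Western Railway", "GWR"),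
--      _in_group(["Great Western Main Line", "Great Western Railway",
--                 "Reading to Basingstoke Line", "Cotswold Line",
--                 "Thames Valley Line", "Relief Line"])),
--     (("Great Western Railway", "GWR"), _has_gwr_keyword),
--     (("Cross Country", "CrossCountry"),
--      _in_group(["Cross Country Line", "CrossCountry", "West Coast Main Line",
--                 "East Coast Main Line", "Midland Main Line"])),
--     (("South Western Railway", "SWR"),
--      _in_group(["South Western Main Line", "Portsmouth Direct Line",
--                 "Reading to Basingstoke Line"])),
--     (("Virgin Trains", "Avanti West Coast"),
--      _in_group(["West Coast Main Line", "Virgin Trains", "Avanti West Coast"])),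
-- ]
--
--
-- def _is_likely_same_train_service(current_line: str, next_line: str, operator: str) -> bool:
--     return any(operator in ops and pred(current_line) and pred(next_line)
--                for ops, pred in _RULES)
-- ===== Notes on version B (the rewrite author's own statement) =====
-- stated objective: simpler
-- what changed: Replaced A's chain of per-operator if-blocks with nested membership tests and a special GWR keyword fallback branch by a single declarative rules table of (operator-aliases, line-predicate) pairs folded with one any(); the keyword fallback is just another rule.
import Mathlib
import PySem

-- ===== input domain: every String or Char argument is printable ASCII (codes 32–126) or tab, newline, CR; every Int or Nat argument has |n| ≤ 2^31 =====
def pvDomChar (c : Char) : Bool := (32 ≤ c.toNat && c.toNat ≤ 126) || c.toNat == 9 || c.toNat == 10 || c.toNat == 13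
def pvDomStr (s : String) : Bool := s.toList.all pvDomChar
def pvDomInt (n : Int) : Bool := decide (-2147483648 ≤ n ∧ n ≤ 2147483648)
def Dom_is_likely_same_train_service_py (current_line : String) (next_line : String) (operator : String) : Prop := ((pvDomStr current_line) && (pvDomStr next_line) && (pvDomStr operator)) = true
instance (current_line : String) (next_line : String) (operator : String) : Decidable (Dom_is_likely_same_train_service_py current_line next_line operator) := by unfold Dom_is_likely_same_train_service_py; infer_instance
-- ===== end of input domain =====

-- B: one declarative (aliases, line-predicate) rules table folded with a single any();
-- the GWR keyword fallback becomes an ordinary rule (objective: simpler).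
-- ===== PORT A =====
def pvA_rest3 (current_line : String) (next_line : String) (operator : String) : Bool :=
  if (["Virgin Trains", "Avanti West Coast"] : List String).contains operator then
    let west_coast_lines : List String :=
      ["West Coast Main Line", "Virgin Trains", "Avanti West Coast"]
    west_coast_lines.contains current_line && west_coast_lines.contains next_line
  else false

def pvA_rest2 (current_line : String) (next_line : String) (operator : String) : Bool :=
  if (["South Western Railway", "SWR"] : List String).contains operator then
    let swr_lines : List String :=
      ["South Western Main Line", "Portsmouth Direct Line", "Reading to Basingstoke Line"]
    if swr_lines.contains current_line && swr_lines.contains next_line then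
      true
    else pvA_rest3 current_line next_line operator
  else pvA_rest3 current_line next_line operator

-- GWR block falls through to the remaining operator checks; those are the helper `pvA_rest`.
def pvA_rest (current_line : String) (next_line : String) (operator : String) : Bool :=
  if (["Cross Country", "CrossCountry"] : List String).contains operator then
    let cross_country_lines : List String :=
      ["Cross Country Line", "CrossCountry", "West Coast Main Line",
       "East Coast Main Line", "Midland Main Line"]
    if cross_country_lines.contains current_line && cross_country_lines.contains next_line then
      true
    else pvA_rest2 current_line next_line operator
  else pvA_rest2 current_line next_line operator

def is_likely_same_train_service_py (current_line : String) (next_line : String) (operator : String) : Bool :=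
  if (["Great Western Railway", "GWR"] : List String).contains operator then
    let gwr_lines : List String :=
      ["Great Western Main Line", "Great Western Railway", "Reading to Basingstoke Line",
       "Cotswold Line", "Thames Valley Line", "Relief Line"]
    if gwr_lines.contains current_line && gwr_lines.contains next_line then
      true
    else
      let current_lower := PySem.Str.lower current_line
      let next_lower := PySem.Str.lower next_line
      let gwr_keywords : List String := ["great western", "gwr", "reading", "cotswold", "thames valley"]
      let current_has_gwr := gwr_keywords.any (fun kw => PySem.Str.isIn kw current_lower)
      let next_has_gwr := gwr_keywords.any (fun kw => PySem.Str.isIn kw next_lower)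
      if current_has_gwr && next_has_gwr then true
      else pvA_rest current_line next_line operator
  else pvA_rest current_line next_line operator

-- ===== PORT B =====
def pvGwrKeywords : List String := ["great western", "gwr", "reading", "cotswold", "thames valley"]

def pvInGroup (lines : List String) : String → Bool := fun line => lines.contains line

def pvHasGwrKeyword (line : String) : Bool :=
  let low := PySem.Str.lower line
  pvGwrKeywords.any (fun kw => PySem.Str.isIn kw low)

-- declarative rules table: (operator aliases, line predicate)
def pvRules : List (List String × (String → Bool)) :=
  [ (["Great Western Railway", "GWR"],
     pvInGroup ["Great Western Main Line", "Great Western Railway",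
                "Reading to Basingstoke Line", "Cotswold Line",
                "Thames Valley Line", "Relief Line"]),
    (["Great Western Railway", "GWR"], pvHasGwrKeyword),
    (["Cross Country", "CrossCountry"],
     pvInGroup ["Cross Country Line", "CrossCountry", "West Coast Main Line",
                "East Coast Main Line", "Midland Main Line"]),
    (["South Western Railway", "SWR"],
     pvInGroup ["South Western Main Line", "Portsmouth Direct Line",
                "Reading to Basingstoke Line"]),
    (["Virgin Trains", "Avanti West Coast"],
     pvInGroup ["West Coast Main Line", "Virgin Trains", "Avanti West Coast"]) ]

def is_likely_same_train_service_py_alt (current_line : String) (next_line : String) (operator : String) : Bool :=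
  pvRules.any (fun r => r.1.contains operator && r.2 current_line && r.2 next_line)

-- ===== PRECONDITION & SPEC =====
def Spec_is_likely_same_train_service_py (current_line : String) (next_line : String) (operator : String) (out : Bool) : Prop := out = is_likely_same_train_service_py_alt current_line next_line operator
instance (current_line : String) (next_line : String) (operator : String) (out : Bool) : Decidable (Spec_is_likely_same_train_service_py current_line next_line operator out) := by unfold Spec_is_likely_same_train_service_py; infer_instance

-- ===== CLAIM (what is proved, stated in full; the proofs are below) =====
def Claim_equal_is_likely_same_train_service_py : Prop := ∀ (current_line : String) (next_line : String) (operator : String), Dom_is_likely_same_train_service_py current_line next_line operator → Spec_is_likely_same_train_service_py current_line next_line operator (is_likely_same_train_service_py current_line next_line operator)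

-- ===== LEMMAS AND PROOFS =====

-- ===== VERDICT (by name: the statement is the Claim_ definition above) =====
theorem is_likely_same_train_service_py_spec : Claim_equal_is_likely_same_train_service_py := by
  intro c n op _
  unfold Spec_is_likely_same_train_service_py
  simp only [is_likely_same_train_service_py, is_likely_same_train_service_py_alt,
    pvA_rest, pvA_rest2, pvA_rest3, pvRules, pvInGroup, pvHasGwrKeyword, pvGwrKeywords,
    List.any_cons, List.any_nil, List.contains_cons, List.contains_nil]
  by_cases h1 : op = "Great Western Railway" <;>
  by_cases h2 : op = "GWR" <;>
  by_cases h3 : op = "Cross Country" <;>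
  by_cases h4 : op = "CrossCountry" <;>
  by_cases h5 : op = "South Western Railway" <;>
  by_cases h6 : op = "SWR" <;>
  by_cases h7 : op = "Virgin Trains" <;>
  by_cases h8 : op = "Avanti West Coast" <;>
  simp_all <;> tauto
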